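-- pv_equiv track=rewrite | github.com/starypatyk/nerdle-solver | libnerdle.py | calculate_answers
-- ===== SOURCE A (Python) =====
-- def compare_guess(secret, guess):
--     result = ['0'] * 8
--     for n in range(0, 8):
--         if secret[n] == guess[n]:
--             result[n] = '2'
--     for n in range(0, 8):
--         if secret[n] != guess[n]:
--             for m in range(0, 8):
--                 if (m != n) and (secret[n] == guess[m]) and (result[m] == '0'):
--                     result[m] = '1'
--                     break
--     return "".join(result)
--
-- def calculate_answers(guess, test_perms):
--     answers = {}
--
--     # Check possible answers
--     for n in range(0, len(test_perms)):
--         perm = test_perms[n]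
--         result = compare_guess(perm, guess)
--         if result in answers:
--             answers[result].append(perm)
--         else:
--             answers[result] = [ perm ]
--
--     return answers
-- ===== SOURCE B (Python) =====
-- def compare_guess(secret, guess):
--     # one pass marking greens and counting non-green secret letters,
--     # then one pass assigning yellows from the counter
--     result = []
--     counts = {}
--     for n in range(0, 8):
--         if secret[n] == guess[n]:
--             result.append('2')
--         else:
--             result.append('0')
--             counts[secret[n]] = counts.get(secret[n], 0) + 1
--     out = []
--     for m in range(0, 8):
--         c = guess[m]
--         if result[m] == '0' and counts.get(c, 0) > 0:
--             out.append('1')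
--             counts[c] = counts[c] - 1
--         else:
--             out.append(result[m])
--     return "".join(out)
--
-- def calculate_answers(guess, test_perms):
--     answers = {}
--     for perm in test_perms:
--         answers.setdefault(compare_guess(perm, guess), []).append(perm)
--     return answers
-- ===== Notes on version B (the rewrite author's own statement) =====
-- stated objective: faster
-- what changed: compare_guess replaces the nested first-free-slot scan (for each secret position, rescan all 8 guess positions) by two linear passes: mark greens while counting non-green secret letters in a dict, then assign yellows in guess order while the letter's count is positive; grouping iterates the permutations directly with setdefault instead of indexing by range(len(...)).
import Mathlib
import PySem

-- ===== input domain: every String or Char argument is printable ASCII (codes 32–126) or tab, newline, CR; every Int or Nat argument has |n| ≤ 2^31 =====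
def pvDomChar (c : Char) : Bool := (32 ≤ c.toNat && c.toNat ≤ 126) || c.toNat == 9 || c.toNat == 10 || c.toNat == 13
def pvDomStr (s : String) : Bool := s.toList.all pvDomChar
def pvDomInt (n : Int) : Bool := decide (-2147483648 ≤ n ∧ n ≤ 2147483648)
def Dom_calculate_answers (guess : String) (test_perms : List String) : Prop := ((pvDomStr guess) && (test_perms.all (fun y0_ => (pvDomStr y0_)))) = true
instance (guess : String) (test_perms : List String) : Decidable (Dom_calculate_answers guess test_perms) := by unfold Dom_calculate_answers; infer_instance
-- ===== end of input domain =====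

-- B rewrite: compare_guess via two linear passes with a letter counter instead of the
-- nested first-free-slot scan; grouping by direct iteration with setdefault.

-- s[i] for an index Pre_ guarantees in range (none never fires under Pre_)
def pvChar (s : String) (i : Int) : Char := (PySem.Str.pyGet? s i).getD ' '

-- ===== PORT A =====
-- inner 'for m in range(0,8): … break' of compare_guess
def compareA_inner (secret guess : String) (n : Int) (r : List Char) : List Int → List Char
  | [] => r
  | m :: ms =>
    if m ≠ n ∧ pvChar secret n = pvChar guess m ∧ PySem.List.pyGetD r m ' ' = '0' then
      PySem.List.pySetD r m '1'
    else compareA_inner secret guess n r ms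

def compareA (secret guess : String) : String :=
  let result : List Char := PySem.List.pyRepeat ['0'] 8
  let result := (PySem.List.pyRange 0 8 1).foldl
    (fun r n => if pvChar secret n = pvChar guess n then PySem.List.pySetD r n '2' else r) result
  let result := (PySem.List.pyRange 0 8 1).foldl
    (fun r n => if pvChar secret n ≠ pvChar guess n then
        compareA_inner secret guess n r (PySem.List.pyRange 0 8 1)
      else r) result
  String.ofList result

def calculate_answers (guess : String) (test_perms : List String) : List (String × List String) :=
  let answers : PySem.Dict String (List String) := PySem.Dict.empty
  let answers := (PySem.List.pyRange 0 (PySem.List.len test_perms) 1).foldl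
    (fun answers n =>
      let perm := PySem.List.pyGetD test_perms n ""
      let result := compareA perm guess
      if answers.contains result then
        answers.insert result (answers.getD result [] ++ [perm])
      else
        answers.insert result [perm]) answers
  answers.items

-- ===== PORT B =====
def compareB (secret guess : String) : String :=
  let st := (PySem.List.pyRange 0 8 1).foldl
    (fun (st : List Char × PySem.Dict Char Int) n =>
      if pvChar secret n = pvChar guess n then (st.1 ++ ['2'], st.2)
      else (st.1 ++ ['0'], st.2.insert (pvChar secret n) (st.2.getD (pvChar secret n) 0 + 1)))
    ([], PySem.Dict.empty)
  let result := st.1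
  let st2 := (PySem.List.pyRange 0 8 1).foldl
    (fun (st : List Char × PySem.Dict Char Int) m =>
      let c := pvChar guess m
      if PySem.List.pyGetD result m ' ' = '0' ∧ st.2.getD c 0 > 0 then
        (st.1 ++ ['1'], st.2.insert c (st.2.getD c 0 - 1))
      else (st.1 ++ [PySem.List.pyGetD result m ' '], st.2))
    ([], st.2)
  String.ofList st2.1

def calculate_answers_alt (guess : String) (test_perms : List String) : List (String × List String) :=
  (test_perms.foldl
    (fun (answers : PySem.Dict String (List String)) perm =>
      let r := compareB perm guess
      answers.insert r (answers.getD r [] ++ [perm]))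
    PySem.Dict.empty).items

-- ===== PRECONDITION & SPEC =====
-- Pre_ excludes exactly the inputs on which Python A raises IndexError: a nonempty
-- permutation list with guess or some permutation shorter than 8 characters.
def Pre_calculate_answers (guess : String) (test_perms : List String) : Prop :=
  test_perms = [] ∨ (8 ≤ guess.toList.length ∧ ∀ p ∈ test_perms, 8 ≤ p.toList.length)
instance (guess : String) (test_perms : List String) : Decidable (Pre_calculate_answers guess test_perms) := by unfold Pre_calculate_answers; infer_instance

def pvWitness_calculate_answers : String × List String :=
  ("48-32=16", ["48-32=16", "12+34=46", "11+11=22"])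

def Spec_calculate_answers (guess : String) (test_perms : List String) (out : List (String × List String)) : Prop := out = calculate_answers_alt guess test_perms
instance (guess : String) (test_perms : List String) (out : List (String × List String)) : Decidable (Spec_calculate_answers guess test_perms out) := by unfold Spec_calculate_answers; infer_instance

-- ===== CLAIM (what is proved, stated in full; the proofs are below) =====
def Claim_equal_calculate_answers : Prop := ∀ (guess : String) (test_perms : List String), Dom_calculate_answers guess test_perms → Pre_calculate_answers guess test_perms → Spec_calculate_answers guess test_perms (calculate_answers guess test_perms)

-- ===== LEMMAS AND PROOFS =====

-- character of s at Nat position j (pvChar at a cast index)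
def Sc (s : String) (j : Nat) : Char := pvChar s (j : Int)

theorem Sc_eq (s : String) (j : Nat) : pvChar s (j : Int) = Sc s j := rfl

-- number of non-green guess positions with letter c strictly below m
def pcA (S G : Nat → Char) (c : Char) (m : Nat) : Nat :=
  (List.range m).countP (fun j => decide (S j ≠ G j ∧ G j = c))

-- number of non-green secret positions with letter c strictly below k
def scA (S G : Nat → Char) (k : Nat) (c : Char) : Nat :=
  (List.range k).countP (fun n => decide (S n ≠ G n ∧ S n = c))

-- the result character at position m after the first k secret positions were processed
def stF (S G : Nat → Char) (k m : Nat) : Char :=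
  if S m = G m then '2' else if pcA S G (G m) m < scA S G k (G m) then '1' else '0'

theorem pcA_succ (S G : Nat → Char) (c : Char) (m : Nat) :
    pcA S G c (m + 1) = pcA S G c m + (if S m ≠ G m ∧ G m = c then 1 else 0) := by
  simp [pcA, List.range_succ, List.countP_append, List.countP_cons]

theorem scA_succ (S G : Nat → Char) (k : Nat) (c : Char) :
    scA S G (k + 1) c = scA S G k c + (if S k ≠ G k ∧ S k = c then 1 else 0) := by
  simp [scA, List.range_succ, List.countP_append, List.countP_cons]

theorem pcA_mono (S G : Nat → Char) (c : Char) {m m' : Nat} (h : m ≤ m') :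
    pcA S G c m ≤ pcA S G c m' := by
  induction m', h using Nat.le_induction with
  | base => exact le_rfl
  | succ m' _ ih => rw [pcA_succ]; omega

theorem pcA_lt_of_cand (S G : Nat → Char) {c : Char} {j m : Nat} (hjm : j < m)
    (hc : S j ≠ G j ∧ G j = c) : pcA S G c j < pcA S G c m := by
  have h1 : pcA S G c (j + 1) = pcA S G c j + 1 := by rw [pcA_succ, if_pos hc]
  have h2 := pcA_mono S G c (show j + 1 ≤ m from hjm)
  omega

theorem pcA_rank (S G : Nat → Char) {c : Char} {m t : Nat} (h : t < pcA S G c m) :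
    ∃ j, j < m ∧ (S j ≠ G j ∧ G j = c) ∧ pcA S G c j = t := by
  induction m with
  | zero => simp [pcA] at h
  | succ m ih =>
    rw [pcA_succ] at h
    by_cases h2 : t < pcA S G c m
    · obtain ⟨j, hj, hc, he⟩ := ih h2
      exact ⟨j, by omega, hc, he⟩
    · by_cases hc : S m ≠ G m ∧ G m = c
      · rw [if_pos hc] at h
        exact ⟨m, Nat.lt_succ_self m, hc, by omega⟩
      · rw [if_neg hc] at h; omega

theorem set_map_range {α : Type} (f : Nat → α) (N n : Nat) (_hn : n < N) (v : α) :
    ((List.range N).map f).set n v = (List.range N).map (fun m => if m = n then v else f m) := by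
  apply List.ext_getElem
  · simp
  · intro i h1 h2
    simp only [List.getElem_set, List.getElem_map, List.getElem_range] at *
    by_cases hi : i = n
    · simp [hi]
    · simp [hi, Ne.symm hi]

theorem getD_map_range_lt {α : Type} (f : Nat → α) {N j : Nat} (h : j < N) (d : α) :
    ((List.range N).map f).getD j d = f j := by
  rw [List.getD_eq_getElem?_getD]
  simp [h]

theorem find?_range_eq_some {q : Nat → Bool} {n m0 : Nat} (hm : m0 < n) (hq : q m0 = true)
    (hmin : ∀ j, j < m0 → q j = false) : (List.range n).find? q = some m0 := by
  induction n with
  | zero => omega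
  | succ n ih =>
    rw [List.range_succ, List.find?_append]
    by_cases h : m0 < n
    · rw [ih h]; rfl
    · have hmn : m0 = n := by omega
      have hnone : (List.range n).find? q = none := by
        rw [List.find?_eq_none]
        intro x hx
        simp only [List.mem_range] at hx
        simp [hmin x (by omega : x < m0)]
      rw [hnone]
      subst hmn
      simp [List.find?, hq]

theorem innerA_find (s g : String) (n : Int) (r : List Char) (ms : List Int) :
    compareA_inner s g n r ms =
      match ms.find? (fun m => decide (m ≠ n ∧ pvChar s n = pvChar g m ∧ PySem.List.pyGetD r m ' ' = '0')) with
      | some m => PySem.List.pySetD r m '1'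
      | none => r := by
  induction ms with
  | nil => rfl
  | cons m ms ih =>
    rw [compareA_inner, List.find?_cons]
    by_cases h : m ≠ n ∧ pvChar s n = pvChar g m ∧ PySem.List.pyGetD r m ' ' = '0'
    · simp [h]
    · simp [h, ih]

theorem pyRange8 : PySem.List.pyRange 0 8 1 = (List.range 8).map (fun k : Nat => (k : Int)) := by
  rw [PySem.List.pyRange_one]
  simp only [sub_zero, zero_add]
  rfl

theorem phase1A (S G : Nat → Char) : ∀ k, k ≤ 8 →
    (List.range k).foldl (fun r j => if S j = G j then r.set j '2' else r) (List.replicate 8 '0')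
      = (List.range 8).map (fun m => if m < k ∧ S m = G m then '2' else '0') := by
  intro k
  induction k with
  | zero =>
    intro _
    have h : ∀ m ∈ List.range 8, (if m < 0 ∧ S m = G m then '2' else '0') = '0' := by
      intro m _; simp
    rw [List.map_congr_left h, List.map_const', List.length_range]
    rfl
  | succ k ih =>
    intro hk
    rw [List.range_succ, List.foldl_append, ih (by omega)]
    simp only [List.foldl_cons, List.foldl_nil]
    by_cases hg : S k = G k
    · rw [if_pos hg, set_map_range _ 8 k (by omega)]
      apply List.map_congr_left
      intro m hm
      simp only [List.mem_range] at hm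
      by_cases hmk : m = k
      · subst hmk; simp [hg]
      · have hiff : (m ≤ k ∧ S m = G m) ↔ (m < k ∧ S m = G m) := by
          constructor <;> rintro ⟨h1, h2⟩ <;> exact ⟨by omega, h2⟩
        simp [hmk, hiff]
    · rw [if_neg hg]
      apply List.map_congr_left
      intro m hm
      simp only [List.mem_range] at hm
      by_cases hmk : m = k
      · subst hmk; simp [hg]
      · have hiff : (m ≤ k ∧ S m = G m) ↔ (m < k ∧ S m = G m) := by
          constructor <;> rintro ⟨h1, h2⟩ <;> exact ⟨by omega, h2⟩
        simp [hiff]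

theorem stF_eq_zero_iff (S G : Nat → Char) (k m : Nat) :
    stF S G k m = '0' ↔ (¬ S m = G m ∧ ¬ pcA S G (G m) m < scA S G k (G m)) := by
  unfold stF
  split_ifs with h1 h2
  · exact iff_of_false (by decide) (fun h => h.1 h1)
  · exact iff_of_false (by decide) (fun h => h.2 h2)
  · exact iff_of_true rfl ⟨h1, h2⟩

theorem innerA_range8 (s g : String) (k : Nat) (r : List Char) :
    compareA_inner s g (k : Int) r ((List.range 8).map (fun i : Nat => (i : Int))) =
      match (List.range 8).find?
          (fun j => decide (j ≠ k ∧ pvChar s (k : Int) = pvChar g (j : Int) ∧ PySem.List.pyGetD r (j : Int) ' ' = '0')) with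
      | some m => r.set m '1'
      | none => r := by
  rw [innerA_find, List.find?_map]
  have hpq : ((fun m : Int => decide (m ≠ (k : Int) ∧ pvChar s (k : Int) = pvChar g m ∧ PySem.List.pyGetD r m ' ' = '0'))
        ∘ (fun i : Nat => (i : Int)))
      = (fun j : Nat => decide (j ≠ k ∧ pvChar s (k : Int) = pvChar g (j : Int) ∧ PySem.List.pyGetD r (j : Int) ' ' = '0')) := by
    funext j
    simp only [Function.comp_apply, Nat.cast_inj, ne_eq]
  rw [hpq]
  cases hfd : (List.range 8).find?
      (fun j => decide (j ≠ k ∧ pvChar s (k : Int) = pvChar g (j : Int) ∧ PySem.List.pyGetD r (j : Int) ' ' = '0')) with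
  | none => rfl
  | some m => simp [PySem.List.pySetD_natCast]

theorem phase2A (secret guess : String) : ∀ k, k ≤ 8 →
    (List.range k).foldl
      (fun r j => if Sc secret j ≠ Sc guess j then
          compareA_inner secret guess (j : Int) r ((List.range 8).map (fun i : Nat => (i : Int)))
        else r)
      ((List.range 8).map (stF (Sc secret) (Sc guess) 0))
    = (List.range 8).map (stF (Sc secret) (Sc guess) k) := by
  intro k
  induction k with
  | zero => intro _; rfl
  | succ k ih =>
    intro hk
    rw [show List.range (k + 1) = List.range k ++ [k] from List.range_succ, List.foldl_append,
      ih (by omega)]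
    simp only [List.foldl_cons, List.foldl_nil]
    by_cases hg : Sc secret k = Sc guess k
    · rw [if_neg (fun h => h hg)]
      apply List.map_congr_left
      intro m hm
      have hs : scA (Sc secret) (Sc guess) (k + 1) (Sc guess m)
          = scA (Sc secret) (Sc guess) k (Sc guess m) := by
        rw [scA_succ, if_neg (fun h => h.1 hg)]
        omega
      unfold stF
      rw [hs]
    · have hsp : scA (Sc secret) (Sc guess) (k + 1) (Sc secret k)
          = scA (Sc secret) (Sc guess) k (Sc secret k) + 1 := by
        rw [scA_succ, if_pos ⟨hg, rfl⟩]
      have hso : ∀ c, c ≠ Sc secret k → scA (Sc secret) (Sc guess) (k + 1) c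
          = scA (Sc secret) (Sc guess) k c := by
        intro c hcne
        rw [scA_succ, if_neg (fun h => hcne h.2.symm)]
        omega
      rw [if_pos hg, innerA_range8]
      by_cases hex : ∃ m0, m0 < 8 ∧ (Sc secret m0 ≠ Sc guess m0 ∧ Sc guess m0 = Sc secret k) ∧
          pcA (Sc secret) (Sc guess) (Sc secret k) m0 = scA (Sc secret) (Sc guess) k (Sc secret k)
      · obtain ⟨m0, hm0, hcand, hrank⟩ := hex
        have hq0 : (fun j => decide (j ≠ k ∧ pvChar secret (k : Int) = pvChar guess (j : Int) ∧
            PySem.List.pyGetD ((List.range 8).map (stF (Sc secret) (Sc guess) k)) (j : Int) ' ' = '0')) m0 = true := by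
          simp only [decide_eq_true_eq]
          refine ⟨?_, ?_, ?_⟩
          · intro hkk; rw [hkk] at hcand; exact hg hcand.2.symm
          · exact hcand.2.symm
          · rw [PySem.List.pyGetD_natCast, getD_map_range_lt _ hm0]
            exact (stF_eq_zero_iff _ _ _ _).mpr ⟨hcand.1, by rw [hcand.2, hrank]; omega⟩
        have hqmin : ∀ j, j < m0 → (fun j => decide (j ≠ k ∧ pvChar secret (k : Int) = pvChar guess (j : Int) ∧
            PySem.List.pyGetD ((List.range 8).map (stF (Sc secret) (Sc guess) k)) (j : Int) ' ' = '0')) j = false := by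
          intro j hj
          simp only [decide_eq_false_iff_not]
          rintro ⟨hjk, hEq, h0⟩
          rw [PySem.List.pyGetD_natCast, getD_map_range_lt _ (lt_trans hj hm0)] at h0
          obtain ⟨hngj, hnl⟩ := (stF_eq_zero_iff _ _ _ _).mp h0
          have hGj : Sc guess j = Sc secret k := hEq.symm
          rw [hGj] at hnl
          have hlt := pcA_lt_of_cand (Sc secret) (Sc guess) hj ⟨hngj, hGj⟩
          rw [hrank] at hlt
          omega
        rw [find?_range_eq_some hm0 hq0 hqmin]
        dsimp only
        rw [set_map_range _ 8 m0 hm0]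
        apply List.map_congr_left
        intro m hm
        simp only [List.mem_range] at hm
        by_cases hmm0 : m = m0
        · subst hmm0
          rw [if_pos rfl]
          unfold stF
          rw [if_neg hcand.1, hcand.2, hsp, if_pos (by omega)]
        · rw [if_neg hmm0]
          unfold stF
          by_cases hgm : Sc secret m = Sc guess m
          · rw [if_pos hgm, if_pos hgm]
          · rw [if_neg hgm, if_neg hgm]
            by_cases hGc : Sc guess m = Sc secret k
            · have hne : pcA (Sc secret) (Sc guess) (Sc secret k) m ≠
                  scA (Sc secret) (Sc guess) k (Sc secret k) := by
                intro habs
                rcases Nat.lt_trichotomy m m0 with h | h | h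
                · have := pcA_lt_of_cand (Sc secret) (Sc guess) h ⟨hgm, hGc⟩
                  omega
                · exact hmm0 h
                · have := pcA_lt_of_cand (Sc secret) (Sc guess) h ⟨hcand.1, hcand.2⟩
                  omega
              rw [hGc, hsp, if_congr (by omega :
                (pcA (Sc secret) (Sc guess) (Sc secret k) m < scA (Sc secret) (Sc guess) k (Sc secret k)) ↔
                (pcA (Sc secret) (Sc guess) (Sc secret k) m < scA (Sc secret) (Sc guess) k (Sc secret k) + 1)) rfl rfl]
            · rw [hso (Sc guess m) hGc]
      · have hfd : (List.range 8).find?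
            (fun j => decide (j ≠ k ∧ pvChar secret (k : Int) = pvChar guess (j : Int) ∧
              PySem.List.pyGetD ((List.range 8).map (stF (Sc secret) (Sc guess) k)) (j : Int) ' ' = '0')) = none := by
          rw [List.find?_eq_none]
          intro j hjmem
          simp only [List.mem_range] at hjmem
          simp only [decide_eq_true_eq]
          rintro ⟨hjk, hEq, h0⟩
          rw [PySem.List.pyGetD_natCast, getD_map_range_lt _ hjmem] at h0
          obtain ⟨hngj, hnl⟩ := (stF_eq_zero_iff _ _ _ _).mp h0
          have hGj : Sc guess j = Sc secret k := hEq.symm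
          rw [hGj] at hnl
          rcases Nat.lt_or_ge (scA (Sc secret) (Sc guess) k (Sc secret k))
              (pcA (Sc secret) (Sc guess) (Sc secret k) j) with hlt | hge
          · obtain ⟨j', hj', hc', he'⟩ := pcA_rank (Sc secret) (Sc guess) hlt
            exact hex ⟨j', by omega, hc', he'⟩
          · exact hex ⟨j, hjmem, ⟨hngj, hGj⟩, by omega⟩
        rw [hfd]
        dsimp only
        apply List.map_congr_left
        intro m hm
        simp only [List.mem_range] at hm
        unfold stF
        by_cases hgm : Sc secret m = Sc guess m
        · rw [if_pos hgm, if_pos hgm]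
        · rw [if_neg hgm, if_neg hgm]
          by_cases hGc : Sc guess m = Sc secret k
          · have hne : pcA (Sc secret) (Sc guess) (Sc secret k) m ≠
                scA (Sc secret) (Sc guess) k (Sc secret k) := by
              intro habs
              exact hex ⟨m, hm, ⟨hgm, hGc⟩, habs⟩
            rw [hGc, hsp, if_congr (by omega :
              (pcA (Sc secret) (Sc guess) (Sc secret k) m < scA (Sc secret) (Sc guess) k (Sc secret k)) ↔
              (pcA (Sc secret) (Sc guess) (Sc secret k) m < scA (Sc secret) (Sc guess) k (Sc secret k) + 1)) rfl rfl]
          · rw [hso (Sc guess m) hGc]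

theorem compareA_eq (secret guess : String) :
    compareA secret guess = String.ofList ((List.range 8).map (stF (Sc secret) (Sc guess) 8)) := by
  unfold compareA
  rw [PySem.List.pyRepeat_singleton, show ((8 : Int)).toNat = 8 from rfl, pyRange8]
  simp only [List.foldl_map, PySem.List.pySetD_natCast, Sc_eq]
  rw [phase1A (Sc secret) (Sc guess) 8 le_rfl]
  have h0 : (List.range 8).map (fun m => if m < 8 ∧ Sc secret m = Sc guess m then '2' else '0')
      = (List.range 8).map (stF (Sc secret) (Sc guess) 0) := by
    apply List.map_congr_left
    intro m hm
    simp only [List.mem_range] at hm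
    unfold stF
    have hsc : scA (Sc secret) (Sc guess) 0 (Sc guess m) = 0 := rfl
    by_cases hgm : Sc secret m = Sc guess m
    · simp [hgm, hm]
    · simp [hgm, hm, hsc]
  rw [h0]
  exact congrArg String.ofList (phase2A secret guess 8 le_rfl)

-- the result list after B's first pass
def resL (secret guess : String) : List Char :=
  (List.range 8).map (fun m => if Sc secret m = Sc guess m then '2' else '0')

theorem phase1B (secret guess : String) : ∀ k : Nat,
    ∃ cnt : PySem.Dict Char Int,
      (List.range k).foldl
        (fun (st : List Char × PySem.Dict Char Int) j =>
          if Sc secret j = Sc guess j then (st.1 ++ ['2'], st.2)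
          else (st.1 ++ ['0'], st.2.insert (Sc secret j) (st.2.getD (Sc secret j) 0 + 1)))
        ([], PySem.Dict.empty)
      = ((List.range k).map (fun m => if Sc secret m = Sc guess m then '2' else '0'), cnt)
      ∧ ∀ c, cnt.getD c 0 = (scA (Sc secret) (Sc guess) k c : Int) := by
  intro k
  induction k with
  | zero => exact ⟨PySem.Dict.empty, rfl, fun c => by simp [scA, PySem.Dict.getD_empty]⟩
  | succ k ih =>
    obtain ⟨cnt, heq, hc⟩ := ih
    rw [show List.range (k + 1) = List.range k ++ [k] from List.range_succ, List.foldl_append, heq]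
    simp only [List.foldl_cons, List.foldl_nil]
    by_cases hg : Sc secret k = Sc guess k
    · refine ⟨cnt, ?_, ?_⟩
      · rw [if_pos hg]
        simp [hg]
      · intro c
        rw [scA_succ, if_neg (fun h => h.1 hg)]
        simpa using hc c
    · refine ⟨cnt.insert (Sc secret k) (cnt.getD (Sc secret k) 0 + 1), ?_, ?_⟩
      · rw [if_neg hg]
        simp [hg]
      · intro c
        rw [PySem.Dict.getD_insert]
        by_cases hck : c = Sc secret k
        · rw [if_pos hck, hc, scA_succ, hck, if_pos ⟨hg, rfl⟩]
          push_cast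
          ring
        · rw [if_neg hck, hc, scA_succ, if_neg (fun h => hck h.2.symm)]
          simp

theorem phase2B (secret guess : String) (cnt0 : PySem.Dict Char Int)
    (h0 : ∀ c, cnt0.getD c 0 = (scA (Sc secret) (Sc guess) 8 c : Int)) : ∀ m : Nat, m ≤ 8 →
    ∃ cnt : PySem.Dict Char Int,
      (List.range m).foldl
        (fun (st : List Char × PySem.Dict Char Int) (j : Nat) =>
          if PySem.List.pyGetD (resL secret guess) (j : Int) ' ' = '0' ∧ st.2.getD (Sc guess j) 0 > 0 then
            (st.1 ++ ['1'], st.2.insert (Sc guess j) (st.2.getD (Sc guess j) 0 - 1))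
          else (st.1 ++ [PySem.List.pyGetD (resL secret guess) (j : Int) ' '], st.2))
        ([], cnt0)
      = ((List.range m).map (stF (Sc secret) (Sc guess) 8), cnt)
      ∧ ∀ c, cnt.getD c 0 = (scA (Sc secret) (Sc guess) 8 c : Int)
          - (↑(min (pcA (Sc secret) (Sc guess) c m) (scA (Sc secret) (Sc guess) 8 c)) : Int) := by
  intro m
  induction m with
  | zero =>
    intro _
    refine ⟨cnt0, rfl, fun c => ?_⟩
    have hp : pcA (Sc secret) (Sc guess) c 0 = 0 := rfl
    rw [hp]
    simpa using h0 c
  | succ m ih =>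
    intro hm
    obtain ⟨cnt, heq, hc⟩ := ih (by omega)
    rw [show List.range (m + 1) = List.range m ++ [m] from List.range_succ, List.foldl_append, heq]
    simp only [List.foldl_cons, List.foldl_nil]
    have hm8 : m < 8 := by omega
    have hread : PySem.List.pyGetD (resL secret guess) (m : Int) ' '
        = (if Sc secret m = Sc guess m then '2' else '0') := by
      simp only [resL, PySem.List.pyGetD_natCast]
      exact getD_map_range_lt _ hm8 ' '
    by_cases hg : Sc secret m = Sc guess m
    · refine ⟨cnt, ?_, ?_⟩
      · rw [if_neg (by rw [hread, if_pos hg]; rintro ⟨h1, -⟩; exact absurd h1 (by decide))]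
        rw [hread, if_pos hg]
        simp [stF, hg]
      · intro c
        rw [hc c, pcA_succ, if_neg (fun h => h.1 hg)]
        omega
    · by_cases hy : pcA (Sc secret) (Sc guess) (Sc guess m) m < scA (Sc secret) (Sc guess) 8 (Sc guess m)
      · have hcnt : cnt.getD (Sc guess m) 0 > 0 := by
          rw [hc]
          omega
        refine ⟨cnt.insert (Sc guess m) (cnt.getD (Sc guess m) 0 - 1), ?_, ?_⟩
        · rw [if_pos ⟨by rw [hread, if_neg hg], hcnt⟩]
          simp [stF, hg, hy]
        · intro c
          rw [PySem.Dict.getD_insert]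
          by_cases hck : c = Sc guess m
          · rw [if_pos hck, hc, hck, pcA_succ, if_pos ⟨hg, rfl⟩]
            omega
          · rw [if_neg hck, hc, pcA_succ, if_neg (fun h => hck h.2.symm)]
            omega
      · have hcnt : ¬ cnt.getD (Sc guess m) 0 > 0 := by
          rw [hc]
          omega
        refine ⟨cnt, ?_, ?_⟩
        · rw [if_neg (fun h => hcnt h.2)]
          rw [hread, if_neg hg]
          simp [stF, hg, hy]
        · intro c
          by_cases hck : c = Sc guess m
          · rw [hc, hck, pcA_succ, if_pos ⟨hg, rfl⟩]
            omega
          · rw [hc, pcA_succ, if_neg (fun h => hck h.2.symm)]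
            omega

theorem compareB_eq (secret guess : String) :
    compareB secret guess = String.ofList ((List.range 8).map (stF (Sc secret) (Sc guess) 8)) := by
  unfold compareB
  rw [pyRange8]
  simp only [List.foldl_map, Sc_eq]
  obtain ⟨cnt0, h1, hc0⟩ := phase1B secret guess 8
  rw [h1]
  obtain ⟨cnt, h2, -⟩ := phase2B secret guess cnt0 hc0 8 le_rfl
  rw [show (List.range 8).map (fun m => if Sc secret m = Sc guess m then '2' else '0')
      = resL secret guess from rfl] at *
  rw [h2]

theorem compare_eq (secret guess : String) : compareA secret guess = compareB secret guess := by
  rw [compareA_eq, compareB_eq]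

-- ===== VERDICT (by name: the statement is the Claim_ definition above) =====
theorem calculate_answers_spec : Claim_equal_calculate_answers := by
  intro guess test_perms _ _
  unfold Spec_calculate_answers
  have hbody : (fun (d : PySem.Dict String (List String)) (p : String) =>
      if d.contains (compareA p guess) then
        d.insert (compareA p guess) (d.getD (compareA p guess) [] ++ [p])
      else d.insert (compareA p guess) [p])
      = (fun (d : PySem.Dict String (List String)) (p : String) =>
          d.insert (compareB p guess) (d.getD (compareB p guess) [] ++ [p])) := by
    funext d p
    rw [compare_eq]
    by_cases hcont : d.contains (compareB p guess) = true
    · rw [if_pos hcont]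
    · have hf : d.contains (compareB p guess) = false := by
        simpa using hcont
      rw [if_neg hcont, PySem.Dict.getD_of_not_contains d [] hf]
      simp
  have hfold := PySem.List.foldl_pyRange_zero_pyGetD test_perms ""
    (fun (d : PySem.Dict String (List String)) (p : String) =>
      if d.contains (compareA p guess) then
        d.insert (compareA p guess) (d.getD (compareA p guess) [] ++ [p])
      else d.insert (compareA p guess) [p]) PySem.Dict.empty
  have hA : calculate_answers guess test_perms
      = (test_perms.foldl
          (fun (d : PySem.Dict String (List String)) (p : String) =>
            if d.contains (compareA p guess) then
              d.insert (compareA p guess) (d.getD (compareA p guess) [] ++ [p])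
            else d.insert (compareA p guess) [p]) PySem.Dict.empty).items :=
    congrArg PySem.Dict.items hfold
  rw [hA, hbody]
  rfl
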